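-- pv_equiv track=rewrite | github.com/Whiplashzeb/relation_extration | inner_sentence.py | contain_entity
-- ===== SOURCE A (Python) =====
-- def contain_entity(sentence):
--     sentence = sentence.split()
--
--     chemical = False
--     disease = False
--     for word in sentence:
--         if "C_D" in word or "C_C" in word:
--             chemical = True
--         if "D_D" in word or "D_C" in word:
--             disease = True
--
--     if chemical == True and disease == True:
--         return True
--     else:
--         return False
-- ===== SOURCE B (Python) =====
-- def contain_entity(sentence):
--     return (("C_D" in sentence or "C_C" in sentence)
--             and ("D_D" in sentence or "D_C" in sentence))
-- ===== Notes on version B (the rewrite author's own statement) =====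
-- stated objective: simpler
-- what changed: Drops the split() tokenization and the flag-accumulating loop: since every marker is whitespace-free, membership in some token equals membership in the whole string, so B is a direct boolean combination of four substring tests.
import Mathlib
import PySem

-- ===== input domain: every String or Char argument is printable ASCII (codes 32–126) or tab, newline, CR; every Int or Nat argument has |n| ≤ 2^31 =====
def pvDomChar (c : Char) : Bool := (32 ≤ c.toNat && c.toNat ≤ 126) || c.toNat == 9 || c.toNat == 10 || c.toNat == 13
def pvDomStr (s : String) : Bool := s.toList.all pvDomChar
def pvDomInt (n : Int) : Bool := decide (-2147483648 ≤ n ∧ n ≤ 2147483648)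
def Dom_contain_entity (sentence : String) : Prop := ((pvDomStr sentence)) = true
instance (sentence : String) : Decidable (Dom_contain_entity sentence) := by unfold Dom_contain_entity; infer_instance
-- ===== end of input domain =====

-- B drops split() and the flag loop: markers are whitespace-free, so membership in some token equals membership in the whole sentence (objective: simpler).


-- ===== PORT A =====
def contain_entity (sentence : String) : Bool :=
  let words := PySem.Str.split₀ sentence
  let st := words.foldl
    (fun (st : Bool × Bool) word =>
      (if PySem.Str.isIn "C_D" word || PySem.Str.isIn "C_C" word then true else st.1,
       if PySem.Str.isIn "D_D" word || PySem.Str.isIn "D_C" word then true else st.2))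
    (false, false)
  if st.1 && st.2 then true else false

-- ===== PORT B =====
def contain_entity_alt (sentence : String) : Bool :=
  (PySem.Str.isIn "C_D" sentence || PySem.Str.isIn "C_C" sentence) &&
  (PySem.Str.isIn "D_D" sentence || PySem.Str.isIn "D_C" sentence)

-- ===== PRECONDITION & SPEC =====
def Spec_contain_entity (sentence : String) (out : Bool) : Prop := out = contain_entity_alt sentence
instance (sentence : String) (out : Bool) : Decidable (Spec_contain_entity sentence out) := by unfold Spec_contain_entity; infer_instance

-- ===== CLAIM (what is proved, stated in full; the proofs are below) =====
def Claim_equal_contain_entity : Prop := ∀ (sentence : String), Dom_contain_entity sentence → Spec_contain_entity sentence (contain_entity sentence)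

-- ===== LEMMAS AND PROOFS =====

-- A nonempty pattern is not a prefix of x ++ c :: y when c ∉ pattern and it reaches past x.
lemma prefix_append_cons {sub x y : List Char} {c : Char}
    (hc : c ∉ sub) (h : sub <+: x ++ c :: y) : sub <+: x := by
  induction sub generalizing x with
  | nil => exact List.nil_prefix
  | cons s0 st ih =>
    cases x with
    | nil =>
      rw [List.nil_append, List.cons_prefix_cons] at h
      exact absurd (h.1 ▸ List.mem_cons_self) hc
    | cons x0 xt =>
      rw [List.cons_append, List.cons_prefix_cons] at h
      exact List.cons_prefix_cons.mpr ⟨h.1, ih (fun hm => hc (List.mem_cons_of_mem _ hm)) h.2⟩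

-- An occurrence of a nonempty c-free pattern cannot straddle the separator c.
lemma infix_append_cons {sub u v : List Char} {c : Char}
    (hne : sub ≠ []) (hc : c ∉ sub) : sub <:+: u ++ c :: v ↔ (sub <:+: u ∨ sub <:+: v) := by
  constructor
  · intro h
    induction u with
    | nil =>
      rw [List.nil_append, List.infix_cons_iff] at h
      rcases h with h | h
      · cases sub with
        | nil => exact absurd rfl hne
        | cons s0 st =>
          rw [List.cons_prefix_cons] at h
          exact absurd (h.1 ▸ List.mem_cons_self) hc
      · exact Or.inr h
    | cons a u ih =>
      rw [List.cons_append, List.infix_cons_iff] at h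
      rcases h with h | h
      · exact Or.inl ((prefix_append_cons hc h).isInfix)
      · rcases ih h with h | h
        · exact Or.inl (List.infix_cons_iff.mpr (Or.inr h))
        · exact Or.inr h
  · rintro (h | h)
    · exact h.trans (List.prefix_append _ _).isInfix
    · exact h.trans ((List.suffix_cons c v).trans (List.suffix_append _ _)).isInfix

lemma isIn_nil_of_ne {sub : List Char} (hne : sub ≠ []) : PySem.Chars.isIn sub [] = false := by
  rw [PySem.Chars.isIn_eq_false_iff]
  intro h
  exact hne (List.eq_nil_of_infix_nil h)

lemma isIn_append_cons {sub u v : List Char} {c : Char}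
    (hne : sub ≠ []) (hc : c ∉ sub) :
    PySem.Chars.isIn sub (u ++ c :: v) = (PySem.Chars.isIn sub u || PySem.Chars.isIn sub v) := by
  rw [Bool.eq_iff_iff, PySem.Chars.isIn_iff_infix, Bool.or_eq_true,
      PySem.Chars.isIn_iff_infix, PySem.Chars.isIn_iff_infix]
  exact infix_append_cons hne hc

-- Invariant of the split₀ worker loop: the words found so far plus the pending run carry the same occurrences.
lemma go_any {sub : List Char} (hne : sub ≠ [])
    (hsp : ∀ c ∈ sub, PySem.Chars.isspace c = false) :
    ∀ (s cur : List Char) (acc : List (List Char)),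
      (PySem.Chars.split₀.go s cur acc).any (fun w => PySem.Chars.isIn sub w)
        = (acc.any (fun w => PySem.Chars.isIn sub w) || PySem.Chars.isIn sub (cur.reverse ++ s)) := by
  intro s
  induction s with
  | nil =>
    intro cur acc
    unfold PySem.Chars.split₀.go
    by_cases hcur : cur.isEmpty
    · rw [List.isEmpty_iff] at hcur
      simp [hcur, isIn_nil_of_ne hne]
    · rw [if_neg hcur]
      simp only [List.any_reverse, List.any_cons, List.append_nil]
      rw [Bool.or_comm]
  | cons c rest ih =>
    intro cur acc
    unfold PySem.Chars.split₀.go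
    by_cases hspace : PySem.Chars.isspace c
    · have hcmem : c ∉ sub := fun hm => by simp [hsp c hm] at hspace
      by_cases hcur : cur.isEmpty
      · rw [List.isEmpty_iff] at hcur
        simp only [hspace, if_true, hcur, List.isEmpty_nil, ih, List.reverse_nil, List.nil_append]
        rw [show (c :: rest) = [] ++ c :: rest from rfl, isIn_append_cons hne hcmem,
            isIn_nil_of_ne hne, Bool.false_or]
      · rw [if_pos hspace, if_neg hcur, ih]
        simp only [List.any_cons, List.reverse_nil, List.nil_append]
        rw [isIn_append_cons hne hcmem]
        cases PySem.Chars.isIn sub cur.reverse <;> cases PySem.Chars.isIn sub rest <;>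
          cases acc.any (fun w => PySem.Chars.isIn sub w) <;> rfl
    · rw [if_neg hspace, ih]
      simp [List.reverse_cons, List.append_assoc]

-- The whole-string test equals "some word contains the pattern" for a nonempty whitespace-free pattern.
lemma any_split₀_isIn {sub : List Char} (hne : sub ≠ [])
    (hsp : ∀ c ∈ sub, PySem.Chars.isspace c = false) (s : List Char) :
    (PySem.Chars.split₀ s).any (fun w => PySem.Chars.isIn sub w) = PySem.Chars.isIn sub s := by
  unfold PySem.Chars.split₀
  rw [go_any hne hsp]
  simp

lemma any_or_split {α : Type} (l : List α) (p q : α → Bool) :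
    l.any (fun x => p x || q x) = (l.any p || l.any q) := by
  induction l with
  | nil => rfl
  | cons a t ih =>
    simp only [List.any_cons, ih]
    cases p a <;> cases q a <;> simp

-- Lift any_split₀_isIn to the String-level port for one marker.
lemma str_any_marker (sub : String) (hne : sub.toList ≠ [])
    (hsp : ∀ c ∈ sub.toList, PySem.Chars.isspace c = false) (s : String) :
    (PySem.Str.split₀ s).any (fun w => PySem.Str.isIn sub w) = PySem.Str.isIn sub s := by
  have hmap : (PySem.Str.split₀ s).any (fun w => PySem.Str.isIn sub w)
      = ((PySem.Str.split₀ s).map String.toList).any (fun w => PySem.Chars.isIn sub.toList w) := by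
    rw [List.any_map]
    simp only [Function.comp_def, PySem.Str.isIn_eq]
  rw [hmap, PySem.Str.split₀_map_toList, any_split₀_isIn hne hsp, PySem.Str.isIn_eq]

-- ===== VERDICT (by name: the statement is the Claim_ definition above) =====
theorem contain_entity_spec : Claim_equal_contain_entity := by
  intro s _
  unfold Spec_contain_entity contain_entity contain_entity_alt
  simp only []
  rw [PySem.List.foldl_prod_mk
        (f := fun (b : Bool) word => if PySem.Str.isIn "C_D" word || PySem.Str.isIn "C_C" word then true else b)
        (g := fun (b : Bool) word => if PySem.Str.isIn "D_D" word || PySem.Str.isIn "D_C" word then true else b)]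
  rw [PySem.List.foldl_if_true_eq, PySem.List.foldl_if_true_eq]
  simp only [Bool.false_or, Bool.if_true_left]
  rw [any_or_split, any_or_split,
      str_any_marker "C_D" (by decide) (by intro c hc; simp only [String.toList] at hc; fin_cases hc <;> rfl),
      str_any_marker "C_C" (by decide) (by intro c hc; simp only [String.toList] at hc; fin_cases hc <;> rfl),
      str_any_marker "D_D" (by decide) (by intro c hc; simp only [String.toList] at hc; fin_cases hc <;> rfl),
      str_any_marker "D_C" (by decide) (by intro c hc; simp only [String.toList] at hc; fin_cases hc <;> rfl)]
  cases hC : (PySem.Str.isIn "C_D" s || PySem.Str.isIn "C_C" s) <;>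
    cases hD : (PySem.Str.isIn "D_D" s || PySem.Str.isIn "D_C" s) <;> simp
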